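-- pv_equiv track=rewrite | github.com/sbyeol3/Algorithm-Study | algorithm_Python/Programmers/Stack-Queue/sq6-2.py | solution
-- ===== SOURCE A (Python) =====
-- def solution(prices):
--     leng = len(prices)
--     answer = [0] * leng
--     for i in range(leng) :
--         answer[i] = leng-1-i
--     max = 0
--
--     for i,price in enumerate(prices):
--         if price > max :
--             max = price
--         else :
--             for j in range(0,i):
--                 if prices[j] > price:
--                     answer[j] = i-j
--
--     return answer
-- ===== SOURCE B (Python) =====
-- def solution(prices):
--     # For each j, scan backward from the end for the last later price smaller
--     # than prices[j]; distance to it, or distance to the last index if none.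
--     n = len(prices)
--     res = []
--     for j, p in enumerate(prices):
--         k = n - 1
--         while k > j and prices[k] >= p:
--             k -= 1
--         res.append(k - j if k > j else n - 1 - j)
--     return res
-- ===== Notes on version B (the rewrite author's own statement) =====
-- stated objective: alternative
-- what changed: A initializes answers to end-distances and repeatedly overwrites them in nested forward passes (with a redundant running-max guard); B computes each answer directly with one backward scan per index that stops at the last later smaller price.
import Mathlib
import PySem

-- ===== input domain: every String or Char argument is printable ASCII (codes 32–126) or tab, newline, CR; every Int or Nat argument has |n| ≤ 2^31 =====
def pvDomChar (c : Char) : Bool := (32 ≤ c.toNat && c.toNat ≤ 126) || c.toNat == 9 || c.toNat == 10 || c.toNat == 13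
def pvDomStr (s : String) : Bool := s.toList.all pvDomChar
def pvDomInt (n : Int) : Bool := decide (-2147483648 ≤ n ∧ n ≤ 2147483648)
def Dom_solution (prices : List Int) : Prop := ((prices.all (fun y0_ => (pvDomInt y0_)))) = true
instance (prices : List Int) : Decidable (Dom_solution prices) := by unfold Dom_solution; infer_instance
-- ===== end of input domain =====

-- B replaces A's nested forward overwrite passes by one early-exit backward scan per index; same values, no speed claim.

-- ===== PORT A =====
-- inner loop of A: for j in range(0,i): if prices[j] > price: answer[j] = i-j
def aInner (prices : List Int) (price : Int) (i : Nat) (ans : List Int) : List Int :=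
  (List.range i).foldl
    (fun a j => if prices.getD j 0 > price then a.set j ((i : Int) - (j : Int)) else a) ans

def solution (prices : List Int) : List Int :=
  let leng := prices.length
  let answer0 :=
    (List.range leng).foldl
      (fun a i => a.set i ((leng : Int) - 1 - (i : Int))) (List.replicate leng 0)
  (prices.zipIdx.foldl
    (fun (st : List Int × Int) pi =>
      if pi.1 > st.2 then (st.1, pi.1)
      else (aInner prices pi.1 pi.2 st.1, st.2))
    (answer0, 0)).1

-- ===== PORT B =====
-- B's while loop: while k > j and prices[k] >= p: k -= 1
def bfind (prices : List Int) (p : Int) (j k : Nat) : Nat :=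
  if k ≤ j then k
  else if prices.getD k 0 ≥ p then bfind prices p j (k - 1) else k
termination_by k
decreasing_by omega

def solution_alt (prices : List Int) : List Int :=
  let n := prices.length
  prices.zipIdx.map (fun pj =>
    let k := bfind prices pj.1 pj.2 (n - 1)
    if pj.2 < k then (k : Int) - (pj.2 : Int) else (n : Int) - 1 - (pj.2 : Int))

-- ===== PRECONDITION & SPEC =====
def Spec_solution (prices : List Int) (out : List Int) : Prop := out = solution_alt prices
instance (prices : List Int) (out : List Int) : Decidable (Spec_solution prices out) := by unfold Spec_solution; infer_instance

-- ===== CLAIM (what is proved, stated in full; the proofs are below) =====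
def Claim_equal_solution : Prop := ∀ (prices : List Int), Dom_solution prices → Spec_solution prices (solution prices)

-- ===== LEMMAS AND PROOFS =====

-- last i with j < i < m and prices[i] < pr (none if there is no such i)
def lastS (prices : List Int) (pr : Int) (j m : Nat) : Option Nat :=
  (List.range m).foldl
    (fun acc i => if j < i ∧ prices.getD i 0 < pr then some i else acc) none

-- the value A stores at j after the first m outer iterations
def outv (prices : List Int) (j m : Nat) : Int :=
  match lastS prices (prices.getD j 0) j m with
  | some i => (i : Int) - (j : Int)
  | none => (prices.length : Int) - 1 - (j : Int)

def maxPre (prices : List Int) (m : Nat) : Int :=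
  (List.range m).foldl (fun a i => if prices.getD i 0 > a then prices.getD i 0 else a) 0

theorem lastS_succ (prices : List Int) (pr : Int) (j m : Nat) :
    lastS prices pr j (m + 1)
      = if j < m ∧ prices.getD m 0 < pr then some m else lastS prices pr j m := by
  simp [lastS, List.range_succ]

theorem lastS_none (prices : List Int) (pr : Int) (j : Nat) :
    ∀ m, m ≤ j + 1 → lastS prices pr j m = none := by
  intro m
  induction m with
  | zero => intro _; simp [lastS]
  | succ m ih =>
    intro h
    rw [lastS_succ, if_neg, ih (by omega)]
    rintro ⟨h1, _⟩; omega

theorem lastS_some (prices : List Int) (pr : Int) (j : Nat) :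
    ∀ m i, lastS prices pr j m = some i → j < i ∧ i < m ∧ prices.getD i 0 < pr := by
  intro m
  induction m with
  | zero => intro i h; simp [lastS] at h
  | succ m ih =>
    intro i h
    rw [lastS_succ] at h
    by_cases hc : j < m ∧ prices.getD m 0 < pr
    · rw [if_pos hc] at h
      cases h
      exact ⟨hc.1, by omega, hc.2⟩
    · rw [if_neg hc] at h
      obtain ⟨h1, h2, h3⟩ := ih i h
      exact ⟨h1, by omega, h3⟩

theorem bfind_eq (prices : List Int) (pr : Int) (j : Nat) :
    ∀ k, j ≤ k → bfind prices pr j k = (lastS prices pr j (k + 1)).getD j := by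
  intro k
  induction k with
  | zero =>
    intro h
    rw [bfind, if_pos (by omega), lastS_none prices pr j 1 (by omega), Option.getD_none]
    omega
  | succ k ih =>
    intro h
    by_cases hj : k + 1 ≤ j
    · rw [bfind, if_pos hj, lastS_none prices pr j (k + 2) (by omega), Option.getD_none]
      omega
    · rw [bfind, if_neg hj]
      have hstep := lastS_succ prices pr j (k + 1)
      by_cases hge : prices.getD (k + 1) 0 ≥ pr
      · rw [if_pos hge, Nat.add_sub_cancel, ih (by omega), hstep,
          if_neg (by rintro ⟨_, h2⟩; omega)]
      · rw [if_neg hge, hstep, if_pos ⟨by omega, by omega⟩, Option.getD_some]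

-- unconditional set-fold (A's answer initialization)
theorem init_len (v : Nat → Int) :
    ∀ (m : Nat) (ans : List Int),
      ((List.range m).foldl (fun a i => a.set i (v i)) ans).length = ans.length := by
  intro m
  induction m with
  | zero => intro ans; simp
  | succ m ih => intro ans; simp [List.range_succ, ih]

theorem init_getD (v : Nat → Int) :
    ∀ (m : Nat) (ans : List Int) (j : Nat), j < ans.length →
      ((List.range m).foldl (fun a i => a.set i (v i)) ans).getD j 0
        = if j < m then v j else ans.getD j 0 := by
  intro m
  induction m with
  | zero => intro ans j hj; simp
  | succ m ih =>
    intro ans j hj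
    rw [List.range_succ, List.foldl_append]
    simp only [List.foldl_cons, List.foldl_nil]
    by_cases hjm : j = m
    · subst hjm
      have hlen : j < ((List.range j).foldl (fun a i => a.set i (v i)) ans).length := by
        rw [init_len]; exact hj
      simp [List.getD, List.getElem?_set, hlen]
    · have : ((((List.range m).foldl (fun a i => a.set i (v i)) ans)).set m (v m)).getD j 0
          = ((List.range m).foldl (fun a i => a.set i (v i)) ans).getD j 0 := by
        simp [List.getD, List.getElem?_set, hjm, Ne.symm hjm]
      rw [this, ih ans j hj]
      by_cases h1 : j < m
      · rw [if_pos h1, if_pos (by omega)]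
      · rw [if_neg h1, if_neg (by omega)]

theorem getD_set_self (l : List Int) (m : Nat) (v : Int) (h : m < l.length) :
    (l.set m v).getD m 0 = v := by
  simp [List.getD, List.getElem?_set, h]

theorem getD_set_ne (l : List Int) (m j : Nat) (v : Int) (h : m ≠ j) :
    (l.set m v).getD j 0 = l.getD j 0 := by
  simp [List.getD, List.getElem?_set, h]

-- conditional set-fold (A's inner loop)
theorem inner_len (prices : List Int) (price : Int) (i : Nat) :
    ∀ (m : Nat) (ans : List Int),
      ((List.range m).foldl
        (fun a j => if prices.getD j 0 > price then a.set j ((i : Int) - (j : Int)) else a)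
        ans).length = ans.length := by
  intro m
  induction m with
  | zero => intro ans; simp
  | succ m ih =>
    intro ans
    rw [List.range_succ, List.foldl_append]
    simp only [List.foldl_cons, List.foldl_nil]
    by_cases hc : prices.getD m 0 > price
    · rw [if_pos hc, List.length_set, ih ans]
    · rw [if_neg hc, ih ans]

theorem inner_getD (prices : List Int) (price : Int) (i : Nat) :
    ∀ (m : Nat) (ans : List Int) (j : Nat), j < ans.length →
      ((List.range m).foldl
        (fun a j => if prices.getD j 0 > price then a.set j ((i : Int) - (j : Int)) else a)
        ans).getD j 0
        = if j < m ∧ prices.getD j 0 > price then (i : Int) - (j : Int) else ans.getD j 0 := by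
  intro m
  induction m with
  | zero => intro ans j hj; simp
  | succ m ih =>
    intro ans j hj
    rw [List.range_succ, List.foldl_append]
    simp only [List.foldl_cons, List.foldl_nil]
    have hplen := inner_len prices price i m ans
    by_cases hc : prices.getD m 0 > price
    · rw [if_pos hc]
      by_cases hjm : j = m
      · subst hjm
        rw [getD_set_self _ _ _ (by rw [hplen]; exact hj),
          if_pos ⟨Nat.lt_succ_self j, hc⟩]
      · rw [getD_set_ne _ _ _ _ (Ne.symm hjm), ih ans j hj]
        by_cases h2 : prices.getD j 0 > price
        · by_cases h1 : j < m
          · rw [if_pos ⟨h1, h2⟩, if_pos ⟨by omega, h2⟩]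
          · rw [if_neg (by rintro ⟨ha, _⟩; exact h1 ha),
              if_neg (by rintro ⟨ha, _⟩; exact h1 (by omega))]
        · rw [if_neg (by rintro ⟨_, hb⟩; exact h2 hb),
            if_neg (by rintro ⟨_, hb⟩; exact h2 hb)]
    · rw [if_neg hc, ih ans j hj]
      by_cases h2 : prices.getD j 0 > price
      · by_cases h1 : j < m
        · rw [if_pos ⟨h1, h2⟩, if_pos ⟨by omega, h2⟩]
        · rw [if_neg (by rintro ⟨ha, _⟩; exact h1 ha),
            if_neg (by
              rintro ⟨ha, hb⟩
              rcases Nat.lt_succ_iff_lt_or_eq.mp ha with h | h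
              · exact h1 h
              · subst h; exact hc hb)]
      · rw [if_neg (by rintro ⟨_, hb⟩; exact h2 hb),
          if_neg (by rintro ⟨_, hb⟩; exact h2 hb)]

theorem maxPre_succ (prices : List Int) (m : Nat) :
    maxPre prices (m + 1)
      = if prices.getD m 0 > maxPre prices m then prices.getD m 0 else maxPre prices m := by
  simp [maxPre, List.range_succ]

theorem le_maxPre (prices : List Int) (j : Nat) :
    ∀ m, j < m → prices.getD j 0 ≤ maxPre prices m := by
  intro m
  induction m with
  | zero => intro h; omega
  | succ m ih =>
    intro h
    rw [maxPre_succ]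
    by_cases hjm : j = m
    · subst hjm; split <;> omega
    · have := ih (by omega)
      split <;> omega

theorem zipIdx_eq_map (prices : List Int) :
    prices.zipIdx = (List.range prices.length).map (fun i => (prices.getD i 0, i)) := by
  apply List.ext_getElem
  · simp
  · intro i h1 h2
    have hi : i < prices.length := by simpa using h1
    simp [List.getElem_zipIdx, List.getD, List.getElem?_eq_getElem hi]

def outerF (prices : List Int) (m : Nat) : List Int × Int :=
  (List.range m).foldl
    (fun (st : List Int × Int) i =>
      if prices.getD i 0 > st.2 then (st.1, prices.getD i 0)
      else (aInner prices (prices.getD i 0) i st.1, st.2))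
    ((List.range prices.length).foldl
      (fun a i => a.set i ((prices.length : Int) - 1 - (i : Int)))
      (List.replicate prices.length 0), 0)

theorem outer_inv (prices : List Int) :
    ∀ m, (outerF prices m).1.length = prices.length
      ∧ (∀ j, j < prices.length → (outerF prices m).1.getD j 0 = outv prices j m)
      ∧ (outerF prices m).2 = maxPre prices m := by
  intro m
  induction m with
  | zero =>
    refine ⟨?_, ?_, ?_⟩
    · simp [outerF, init_len]
    · intro j hj
      simp only [outerF, List.range_zero, List.foldl_nil]
      rw [init_getD _ prices.length _ j (by simpa using hj), if_pos hj]
      simp [outv, lastS]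
    · simp [outerF, maxPre]
  | succ m ih =>
    obtain ⟨ihl, ihg, ihm⟩ := ih
    have hstep : outerF prices (m + 1)
        = if prices.getD m 0 > (outerF prices m).2
            then ((outerF prices m).1, prices.getD m 0)
            else (aInner prices (prices.getD m 0) m (outerF prices m).1, (outerF prices m).2) := by
      simp only [outerF, List.range_succ, List.foldl_append, List.foldl_cons, List.foldl_nil]
    by_cases hc : prices.getD m 0 > maxPre prices m
    · rw [hstep, if_pos (by rw [ihm]; exact hc)]
      refine ⟨ihl, ?_, ?_⟩
      · intro j hj
        rw [ihg j hj]
        unfold outv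
        rw [lastS_succ, if_neg]
        rintro ⟨h1, h2⟩
        have := le_maxPre prices j m h1
        omega
      · rw [maxPre_succ, if_pos hc]
    · rw [hstep, if_neg (by rw [ihm]; exact hc)]
      refine ⟨?_, ?_, ?_⟩
      · show (aInner prices (prices.getD m 0) m (outerF prices m).1).length = prices.length
        unfold aInner
        rw [inner_len]
        exact ihl
      · intro j hj
        unfold aInner
        rw [inner_getD prices (prices.getD m 0) m m (outerF prices m).1 j (by rw [ihl]; exact hj),
          ihg j hj]
        unfold outv
        rw [lastS_succ]
        by_cases h1 : j < m ∧ prices.getD m 0 < prices.getD j 0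
        · rw [if_pos h1, if_pos ⟨h1.1, h1.2⟩]
        · rw [if_neg h1, if_neg h1]
      · rw [maxPre_succ, if_neg hc]
        exact ihm

theorem solution_eq_outerF (prices : List Int) :
    solution prices = (outerF prices prices.length).1 := by
  show (prices.zipIdx.foldl
      (fun (st : List Int × Int) pi =>
        if pi.1 > st.2 then (st.1, pi.1)
        else (aInner prices pi.1 pi.2 st.1, st.2))
      ((List.range prices.length).foldl
        (fun a i => a.set i ((prices.length : Int) - 1 - (i : Int)))
        (List.replicate prices.length 0), 0)).1
    = (outerF prices prices.length).1
  rw [zipIdx_eq_map, List.foldl_map]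
  rfl

theorem solution_spec_aux : ∀ prices, solution prices = solution_alt prices := by
  intro prices
  obtain ⟨hl, hg, -⟩ := outer_inv prices prices.length
  rw [solution_eq_outerF]
  have halt : solution_alt prices
      = (List.range prices.length).map (fun j =>
          if j < bfind prices (prices.getD j 0) j (prices.length - 1)
          then ((bfind prices (prices.getD j 0) j (prices.length - 1) : Int)) - (j : Int)
          else (prices.length : Int) - 1 - (j : Int)) := by
    show (prices.zipIdx.map (fun pj =>
        let k := bfind prices pj.1 pj.2 (prices.length - 1)
        if pj.2 < k then (k : Int) - (pj.2 : Int)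
        else (prices.length : Int) - 1 - (pj.2 : Int))) = _
    rw [zipIdx_eq_map, List.map_map]
    rfl
  rw [halt]
  apply List.ext_getElem
  · rw [hl]; simp
  · intro j h1 h2
    have hj : j < prices.length := by rwa [hl] at h1
    have hget : (outerF prices prices.length).1[j] = outv prices j prices.length := by
      rw [← hg j hj, List.getD_eq_getElem _ 0 h1]
    rw [hget, List.getElem_map, List.getElem_range]
    have hk : bfind prices (prices.getD j 0) j (prices.length - 1)
        = (lastS prices (prices.getD j 0) j prices.length).getD j := by
      have h := bfind_eq prices (prices.getD j 0) j (prices.length - 1) (by omega)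
      rwa [(by omega : prices.length - 1 + 1 = prices.length)] at h
    unfold outv
    rw [hk]
    cases hcase : lastS prices (prices.getD j 0) j prices.length with
    | some i =>
      obtain ⟨hji, -, -⟩ := lastS_some prices (prices.getD j 0) j prices.length i hcase
      simp [hji]
    | none =>
      simp

-- ===== VERDICT (by name: the statement is the Claim_ definition above) =====
theorem solution_spec : Claim_equal_solution := by
  intro prices _
  unfold Spec_solution
  exact solution_spec_aux prices
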